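-- pv_equiv track=rewrite | github.com/ManusMcFadden/Intro_to_programming | coursework/cwk1.py | valid_char_in_string
-- ===== SOURCE A (Python) =====
-- def valid_char_in_string(popList: list, charSet: list) -> bool:
--     valid = True  # variable to be returned
--     if not isinstance(popList, list):  # make sure the entered poplist is a list
--         return False
--     if not isinstance(charSet, list):  # make sure charset is a list
--         return False
--     for character in charSet:  # make sure every item in charset is a character
--         if len(character) > 1:
--             return False
--         if not isinstance(character, str):
--             return False
--     for item in popList:
--         if not isinstance(item, str):  # make sure every item in the poplist is a string
--             return False
--         for character in item:  # make sure every item in the poplist only contains characters in the character set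
--             if character not in charSet:
--                 valid = False
--     return valid
-- ===== SOURCE B (Python) =====
-- def valid_char_in_string(popList: list, charSet: list) -> bool:
--     if any(len(c) > 1 for c in charSet):
--         return False
--     table = str.maketrans('', '', ''.join(charSet))
--     return ''.join(popList).translate(table) == ''
-- ===== Notes on version B (the rewrite author's own statement) =====
-- stated objective: idiomatic
-- what changed: Instead of nested loops testing each character's membership in charSet, B joins popList into one string, deletes all allowed characters with str.translate and a maketrans deletion table, and returns whether the remainder is empty.
import Mathlib
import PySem

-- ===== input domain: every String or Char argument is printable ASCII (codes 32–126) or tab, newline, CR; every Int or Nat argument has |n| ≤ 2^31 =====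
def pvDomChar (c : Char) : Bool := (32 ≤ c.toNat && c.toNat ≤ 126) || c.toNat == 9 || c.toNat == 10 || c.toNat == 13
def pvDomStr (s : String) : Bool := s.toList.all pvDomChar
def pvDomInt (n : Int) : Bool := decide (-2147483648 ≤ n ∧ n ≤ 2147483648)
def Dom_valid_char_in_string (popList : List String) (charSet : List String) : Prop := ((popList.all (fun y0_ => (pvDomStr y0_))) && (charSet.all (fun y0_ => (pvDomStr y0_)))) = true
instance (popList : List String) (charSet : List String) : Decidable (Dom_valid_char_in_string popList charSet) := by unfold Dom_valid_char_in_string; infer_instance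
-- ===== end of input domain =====

-- B deletes the allowed characters from the concatenation of popList (str.translate with a
-- deletion table built from ''.join(charSet)) and checks the remainder is empty — no
-- per-character membership scan; an idiomatic rewrite, same behaviour.

-- ===== PORT A =====
-- early-returning 'for character in charSet' guard loop of A
def vcsGuard : List String → Bool
  | [] => true
  | c :: rest =>
    if PySem.Str.len c > 1 then false
    else vcsGuard rest

def valid_char_in_string (popList : List String) (charSet : List String) : Bool :=
  if vcsGuard charSet = false then false
  else
    popList.foldl (fun valid item =>
      item.toList.foldl (fun v ch =>
        if !(charSet.contains (String.ofList [ch])) then false else v) valid) true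

-- ===== PORT B =====
-- ''.join(xs) is ported char-exactly as xs.flatMap String.toList (concatenation of the chars);
-- s.translate(str.maketrans('', '', dels)) is ported char-exactly as filtering out the chars of dels.
def valid_char_in_string_alt (popList : List String) (charSet : List String) : Bool :=
  if charSet.any (fun c => PySem.Str.len c > 1) then false
  else
    let delChars := charSet.flatMap String.toList
    ((popList.flatMap String.toList).filter (fun ch => !(delChars.contains ch))).isEmpty

-- ===== PRECONDITION & SPEC =====
def Spec_valid_char_in_string (popList : List String) (charSet : List String) (out : Bool) : Prop := out = valid_char_in_string_alt popList charSet
instance (popList : List String) (charSet : List String) (out : Bool) : Decidable (Spec_valid_char_in_string popList charSet out) := by unfold Spec_valid_char_in_string; infer_instance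

-- ===== CLAIM =====
def Claim_equal_valid_char_in_string : Prop := ∀ (popList : List String) (charSet : List String), Dom_valid_char_in_string popList charSet → Spec_valid_char_in_string popList charSet (valid_char_in_string popList charSet)

-- ===== LEMMAS AND PROOFS =====

lemma vcsGuard_eq (cs : List String) :
    vcsGuard cs = !cs.any (fun c => PySem.Str.len c > 1) := by
  induction cs with
  | nil => rfl
  | cons c rest ih =>
    rw [vcsGuard, List.any_cons]
    by_cases h : PySem.Str.len c > 1
    · rw [if_pos h]
      simp only [decide_eq_true h, Bool.true_or, Bool.not_true]
    · rw [if_neg h, ih]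
      simp only [decide_eq_false h, Bool.false_or]

lemma vcs_inner {α : Type} (p : α → Bool) (l : List α) (v : Bool) :
    l.foldl (fun v x => p x && v) v = (v && l.all p) := by
  induction l generalizing v with
  | nil => simp
  | cons x rest ih =>
    rw [List.foldl_cons, ih, List.all_cons]
    cases h : p x <;> cases v <;> simp

lemma vcs_outer (p : Char → Bool) (pl : List String) (v : Bool) :
    pl.foldl (fun valid item =>
        item.toList.foldl (fun v ch => p ch && v) valid) v
      = (v && pl.all (fun item => item.toList.all p)) := by
  induction pl generalizing v with
  | nil => simp
  | cons i rest ih =>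
    rw [List.foldl_cons, vcs_inner, ih, List.all_cons]
    cases v <;> cases hi : i.toList.all p <;> simp

-- with every charSet entry of length ≤ 1, a char occurs among the joined chars iff
-- its one-char string is an element of charSet
lemma vcs_flat_contains (cs : List String)
    (h : ∀ c ∈ cs, ¬ PySem.Str.len c > 1) (ch : Char) :
    (cs.flatMap String.toList).contains ch = cs.contains (String.ofList [ch]) := by
  rw [Bool.eq_iff_iff]
  simp only [List.contains_iff_mem, List.mem_flatMap]
  constructor
  · rintro ⟨s, hs, hch⟩
    have hlen : s.toList.length ≤ 1 := by
      have := h s hs; rw [PySem.Str.len_eq] at this; omega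
    have hsl : s.toList = [ch] := by
      match hl : s.toList with
      | [] => rw [hl] at hch; exact absurd hch (List.not_mem_nil)
      | [a] => rw [hl] at hch; simp at hch; rw [hch]
      | a :: b :: t =>
        rw [hl] at hlen; simp at hlen
    have : s = String.ofList [ch] := by rw [← hsl, String.ofList_toList]
    exact this ▸ hs
  · intro hmem
    refine ⟨String.ofList [ch], hmem, ?_⟩
    rw [String.toList_ofList]
    exact List.mem_singleton.mpr rfl

-- ===== VERDICT =====
theorem valid_char_in_string_spec : Claim_equal_valid_char_in_string := by
  intro popList charSet _
  unfold Spec_valid_char_in_string valid_char_in_string valid_char_in_string_alt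
  rw [vcsGuard_eq]
  cases h : charSet.any (fun c => PySem.Str.len c > 1) with
  | true => simp
  | false =>
    rw [Bool.not_false, if_neg (by simp), if_neg (by simp)]
    have hlen : ∀ c ∈ charSet, ¬ PySem.Str.len c > 1 := by
      intro c hc
      have := List.any_eq_false.mp h c hc
      simpa using this
    have hstep : ∀ item : String, ∀ v : Bool,
        item.toList.foldl (fun v ch =>
          if !(charSet.contains (String.ofList [ch])) then false else v) v
        = item.toList.foldl (fun v ch => charSet.contains (String.ofList [ch]) && v) v := by
      intro item v
      apply PySem.List.foldl_congr_mem
      intro b a _; cases hq : charSet.contains (String.ofList [a]) <;> simp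
    calc popList.foldl (fun valid item =>
          item.toList.foldl (fun v ch =>
            if !(charSet.contains (String.ofList [ch])) then false else v) valid) true
        = popList.foldl (fun valid item =>
            item.toList.foldl (fun v ch => charSet.contains (String.ofList [ch]) && v) valid) true := by
          apply PySem.List.foldl_congr_mem
          intro b a _; exact hstep a b
      _ = popList.all (fun item => item.toList.all (fun ch => charSet.contains (String.ofList [ch]))) := by
          rw [vcs_outer]; simp
      _ = ((popList.flatMap String.toList).filter
            (fun ch => !((charSet.flatMap String.toList).contains ch))).isEmpty := by
          rw [Bool.eq_iff_iff]
          simp only [List.isEmpty_iff, List.filter_eq_nil_iff, List.mem_flatMap]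
          simp only [vcs_flat_contains charSet hlen]
          constructor
          · intro hall; simp only [List.all_eq_true] at hall
            rintro ch ⟨s, hs, hch⟩
            simpa using hall s hs ch hch
          · intro hf
            rw [List.all_eq_true]
            intro s hs
            rw [List.all_eq_true]
            intro ch hch
            have := hf ch ⟨s, hs, hch⟩
            simpa using this
      _ = _ := rfl
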